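-- pv_equiv track=rewrite | github.com/Arda-Bati/DSC-20-Homework-Questions | hw07/hw07_solutions.py | create_palindrome_v1
-- ===== SOURCE A (Python) =====
-- def create_palindrome_v1(start, end):
--     """
--     Creates a palindrome of integers starting from start, ending at end
--     (in the middle) All inputs are positive integers. No input validation
--     required.
--     Parameters: start, end (int), positive integers
--     Returns: palindrome sequence (str)
--     Restrictions. You should use recursion in this question.
--     >>> create_palindrome_v1(1, 1)
--     '1'
--     >>> create_palindrome_v1(3, 5)
--     '34543'
--     >>> create_palindrome_v1(5, 2)
--     '5432345'
--
--     +++++++++++++++++++++++++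
--     WRITE YOUR DOCTESTS BELOW
--     +++++++++++++++++++++++++
--     """
--     inc_or_dec = (start < end) * 2 - 1
--
--     if start == end:
--         return '{0}'.format(end)
--     else:
--         return '{0}'.format(start)\
--         + create_palindrome_v1(start\
--         + inc_or_dec, end) + '{0}'.format(start)
-- ===== SOURCE B (Python) =====
-- def create_palindrome_v1(start, end):
--     step = 1 if start < end else -1
--     nums = [str(i) for i in range(start, end + step, step)]
--     return ''.join(nums) + ''.join(reversed(nums[:-1]))
-- ===== Notes on version B (the rewrite author's own statement) =====
-- stated objective: simpler
-- what changed: Replaces A's self-recursion (which wraps each recursive result between two copies of str(start)) by a single forward pass building the list of number strings over range(start, end+step, step) and mirroring it once (join plus reversed join of all but the last piece).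
import Mathlib
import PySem

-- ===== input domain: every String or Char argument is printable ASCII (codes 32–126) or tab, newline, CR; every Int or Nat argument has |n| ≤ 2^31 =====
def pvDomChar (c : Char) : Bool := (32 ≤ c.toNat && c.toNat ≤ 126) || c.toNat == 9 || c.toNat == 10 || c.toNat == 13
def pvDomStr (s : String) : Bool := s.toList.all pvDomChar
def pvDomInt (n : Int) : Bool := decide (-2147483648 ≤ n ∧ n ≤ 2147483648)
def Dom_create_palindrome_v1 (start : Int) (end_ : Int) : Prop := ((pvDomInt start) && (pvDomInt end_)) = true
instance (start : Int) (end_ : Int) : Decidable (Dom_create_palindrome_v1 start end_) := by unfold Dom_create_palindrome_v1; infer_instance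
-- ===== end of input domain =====

-- B replaces A's self-recursion by one forward pass building the list of number strings
-- plus a mirror step (objective: simpler decomposition, same cost).

-- ===== PORT A =====
def create_palindrome_v1 (start : Int) (end_ : Int) : String :=
  let inc_or_dec : Int := (if start < end_ then (1 : Int) else 0) * 2 - 1
  if start = end_ then
    PySem.Int.toStr end_
  else
    PySem.Int.toStr start ++ create_palindrome_v1 (start + inc_or_dec) end_ ++ PySem.Int.toStr start
termination_by (end_ - start).natAbs
decreasing_by
  rename_i h
  split <;> omega

-- ===== PORT B =====
def create_palindrome_v1_alt (start : Int) (end_ : Int) : String :=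
  let step : Int := if start < end_ then 1 else -1
  let nums : List String := (PySem.List.pyRange start (end_ + step) step).map PySem.Int.toStr
  PySem.Str.join "" nums ++ PySem.Str.join "" (PySem.List.slice nums none (some (-1))).reverse

-- ===== PRECONDITION & SPEC =====
-- A recurses once per integer of the run, so CPython raises RecursionError when the run
-- exceeds the interpreter's recursion limit (depth |end-start|+1 vs the interpreter recursion limit); Pre_
-- admits the runs on which A returns (up to the limit, with a small frame margin).
def Pre_create_palindrome_v1 (start : Int) (end_ : Int) : Prop := (end_ - start).natAbs ≤ 9900
instance (start : Int) (end_ : Int) : Decidable (Pre_create_palindrome_v1 start end_) := by unfold Pre_create_palindrome_v1; infer_instance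
def pvWitness_create_palindrome_v1 : Int × Int := (3, 7)

def Spec_create_palindrome_v1 (start : Int) (end_ : Int) (out : String) : Prop := out = create_palindrome_v1_alt start end_
instance (start : Int) (end_ : Int) (out : String) : Decidable (Spec_create_palindrome_v1 start end_ out) := by unfold Spec_create_palindrome_v1; infer_instance

-- ===== CLAIM (what is proved, stated in full; the proofs are below) =====
def Claim_equal_create_palindrome_v1 : Prop := ∀ (start : Int) (end_ : Int), Dom_create_palindrome_v1 start end_ → Pre_create_palindrome_v1 start end_ → Spec_create_palindrome_v1 start end_ (create_palindrome_v1 start end_)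

-- ===== LEMMAS AND PROOFS =====

-- B's list of number strings, as its own function (proof helper).
def pvNums (start : Int) (end_ : Int) : List String :=
  (PySem.List.pyRange start (end_ + (if start < end_ then 1 else -1)) (if start < end_ then 1 else -1)).map PySem.Int.toStr

-- the palindromic character sequence built from a list of pieces
def pvPalin (ns : List String) : List Char :=
  (ns.map String.toList).flatten ++ (ns.dropLast.reverse.map String.toList).flatten

lemma pvNums_ne_nil (start end_ : Int) : pvNums start end_ ≠ [] := by
  unfold pvNums
  split
  · have h : start < end_ := by assumption
    rw [PySem.List.pyRange_one_cons (by omega)]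
    simp
  · rw [PySem.List.pyRange_neg_one_cons (by omega)]
    simp

lemma pvNums_eq_single (end_ : Int) : pvNums end_ end_ = [PySem.Int.toStr end_] := by
  unfold pvNums
  simp only [lt_irrefl, if_false]
  rw [PySem.List.pyRange_neg_one_cons (by omega), PySem.List.pyRange_neg_one_eq_nil (by omega)]
  simp

lemma pvNums_cons (start end_ : Int) (h : start ≠ end_) :
    pvNums start end_ =
      PySem.Int.toStr start ::
        pvNums (start + (if start < end_ then 1 else -1)) end_ := by
  unfold pvNums
  rcases lt_trichotomy start end_ with hlt | heq | hgt
  · simp only [if_pos hlt]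
    rcases eq_or_lt_of_le (by omega : start + 1 ≤ end_) with he | hl
    · simp only [if_neg (by omega : ¬ start + 1 < end_)]
      rw [PySem.List.pyRange_one_cons (by omega)]
      simp only [List.map_cons, List.cons.injEq, true_and]
      congr 1
      rw [← he]
      rw [PySem.List.pyRange_one_cons (by omega), PySem.List.pyRange_one_eq_nil (by omega),
        PySem.List.pyRange_neg_one_cons (by omega), PySem.List.pyRange_neg_one_eq_nil (by omega)]
    · simp only [if_pos hl]
      rw [PySem.List.pyRange_one_cons (by omega)]
      simp
  · exact absurd heq h
  · simp only [if_neg (by omega : ¬ start < end_)]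
    rcases eq_or_lt_of_le (by omega : end_ ≤ start - 1) with he | hl
    · simp only [if_neg (by omega : ¬ start + -1 < end_)]
      rw [PySem.List.pyRange_neg_one_cons (by omega)]
      simp only [List.map_cons, List.cons.injEq, true_and]
      congr 2
    · simp only [if_neg (by omega : ¬ start + -1 < end_)]
      rw [PySem.List.pyRange_neg_one_cons (by omega)]
      simp only [List.map_cons, List.cons.injEq, true_and]
      congr 2

lemma pvPalin_single (x : String) : pvPalin [x] = x.toList := by
  simp [pvPalin]

lemma pvPalin_cons (x : String) (rest : List String) (h : rest ≠ []) :
    pvPalin (x :: rest) = x.toList ++ pvPalin rest ++ x.toList := by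
  unfold pvPalin
  rw [List.dropLast_cons_of_ne_nil h]
  simp

lemma create_palindrome_v1_toList (start end_ : Int) :
    (create_palindrome_v1 start end_).toList = pvPalin (pvNums start end_) := by
  by_cases h : start = end_
  · subst h
    rw [create_palindrome_v1, pvNums_eq_single, pvPalin_single]
    simp
  · rw [create_palindrome_v1]
    simp only [if_neg h]
    rw [pvNums_cons start end_ h]
    have hd : (if start < end_ then (1 : Int) else 0) * 2 - 1 = (if start < end_ then 1 else -1) := by
      split <;> omega
    rw [hd, pvPalin_cons _ _ (pvNums_ne_nil _ _)]
    simp [create_palindrome_v1_toList (start + (if start < end_ then 1 else -1)) end_]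
termination_by (end_ - start).natAbs
decreasing_by split <;> omega

-- ''.join(l) with empty separator is concatenation
lemma pv_join_nil (l : List (List Char)) : PySem.Chars.join [] l = l.flatten := by
  induction l with
  | nil => rfl
  | cons x xs ih =>
    cases xs with
    | nil => simp [PySem.Chars.join, List.intercalate]
    | cons y ys =>
      have h : List.intersperse ([] : List Char) (x :: y :: ys) = x :: [] :: List.intersperse [] (y :: ys) := by
        simp [List.intersperse]
      simp only [PySem.Chars.join, List.intercalate] at *
      rw [h]
      simp_all

lemma create_palindrome_v1_alt_toList (start end_ : Int) :
    (create_palindrome_v1_alt start end_).toList = pvPalin (pvNums start end_) := by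
  unfold create_palindrome_v1_alt pvPalin pvNums
  simp [PySem.Str.toList_join, PySem.List.slice_to_neg_one, pv_join_nil]

-- ===== VERDICT (by name: the statement is the Claim_ definition above) =====
theorem create_palindrome_v1_spec : Claim_equal_create_palindrome_v1 := by
  intro start end_ _ _
  unfold Spec_create_palindrome_v1
  apply String.toList_inj.mp
  rw [create_palindrome_v1_toList, create_palindrome_v1_alt_toList]
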